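-- pv_equiv track=rewrite | github.com/DevAhmedAmr/alx-higher_level_programming | 0x03-python-data_structures/7-add_tuple.py | tuple_to_list
-- ===== SOURCE A (Python) =====
-- def tuple_to_list(tuple_a=()):
--     list_a = []
--     tuple_a_len = len(tuple_a)
--
--     if tuple_a_len > 2:
--         tuple_a_len = 2
--
--     for i in range(tuple_a_len):
--         if tuple_a_len == 1:
--             list_a.append(tuple_a[i])
--             list_a.append(0)
--
--         elif tuple_a_len == 2:
--             list_a.append(tuple_a[i])
--
--     if tuple_a_len == 0:
--         list_a.append(0)
--         list_a.append(0)
--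
--     return list_a
-- ===== SOURCE B (Python) =====
-- def tuple_to_list(tuple_a=()):
--     first = tuple_a[0] if len(tuple_a) >= 1 else 0
--     second = tuple_a[1] if len(tuple_a) >= 2 else 0
--     return [first, second]
-- ===== Notes on version B (the rewrite author's own statement) =====
-- stated objective: simpler
-- what changed: Replaces the clamped-range loop with per-length branching by two closed-form conditional reads of positions 0 and 1.
import Mathlib
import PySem

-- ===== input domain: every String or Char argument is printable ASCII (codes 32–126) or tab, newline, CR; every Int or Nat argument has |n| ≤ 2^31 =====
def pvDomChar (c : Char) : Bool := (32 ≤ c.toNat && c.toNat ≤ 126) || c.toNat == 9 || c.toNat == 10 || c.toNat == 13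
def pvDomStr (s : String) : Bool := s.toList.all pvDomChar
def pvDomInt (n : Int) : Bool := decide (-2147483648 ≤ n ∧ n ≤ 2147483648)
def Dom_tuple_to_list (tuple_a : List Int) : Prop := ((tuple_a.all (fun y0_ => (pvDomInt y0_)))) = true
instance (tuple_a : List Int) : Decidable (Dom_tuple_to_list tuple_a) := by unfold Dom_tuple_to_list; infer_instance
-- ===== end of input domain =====

-- B replaces A's clamped-range loop with two closed-form conditional reads of positions 0 and 1 (simpler).

-- ===== PORT A =====
-- literal transliteration of A: clamp the length to 2, loop over range(clamped),
-- branching on the clamped length inside the loop, then the length-0 special case.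
def tuple_to_list (tuple_a : List Int) : List Int :=
  let tuple_a_len : Int := tuple_a.length
  let tuple_a_len := if tuple_a_len > 2 then 2 else tuple_a_len
  let list_a :=
    (PySem.List.pyRange 0 tuple_a_len 1).foldl (fun list_a i =>
      if tuple_a_len == 1 then
        (list_a ++ [(PySem.List.pyGet? tuple_a i).getD 0]) ++ [0]
      else if tuple_a_len == 2 then
        list_a ++ [(PySem.List.pyGet? tuple_a i).getD 0]
      else list_a) []
  if tuple_a_len == 0 then (list_a ++ [0]) ++ [0] else list_a

-- ===== PORT B =====
def tuple_to_list_alt (tuple_a : List Int) : List Int :=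
  let first := if (tuple_a.length : Int) ≥ 1 then (PySem.List.pyGet? tuple_a 0).getD 0 else 0
  let second := if (tuple_a.length : Int) ≥ 2 then (PySem.List.pyGet? tuple_a 1).getD 0 else 0
  [first, second]

-- ===== PRECONDITION & SPEC =====
def Spec_tuple_to_list (tuple_a : List Int) (out : List Int) : Prop := out = tuple_to_list_alt tuple_a
instance (tuple_a : List Int) (out : List Int) : Decidable (Spec_tuple_to_list tuple_a out) := by unfold Spec_tuple_to_list; infer_instance

-- ===== CLAIM (what is proved, stated in full; the proofs are below) =====
def Claim_equal_tuple_to_list : Prop := ∀ (tuple_a : List Int), Dom_tuple_to_list tuple_a → Spec_tuple_to_list tuple_a (tuple_to_list tuple_a)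

-- ===== LEMMAS AND PROOFS =====

-- ===== VERDICT (by name: the statement is the Claim_ definition above) =====
theorem tuple_to_list_spec : Claim_equal_tuple_to_list := by
  intro tuple_a _
  unfold Spec_tuple_to_list tuple_to_list tuple_to_list_alt
  match tuple_a with
  | [] => decide
  | [a] =>
      simp [PySem.List.pyRange, PySem.List.pyGet?, PySem.List.pyIdx?, List.range_succ]
  | a :: b :: rest =>
      have hlen : ((a :: b :: rest).length : Int) = (rest.length : Int) + 2 := by
        simp; omega
      rcases rest with _ | ⟨c, rest'⟩
      · simp [PySem.List.pyRange, PySem.List.pyGet?, PySem.List.pyIdx?, List.range_succ]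
      · have h2 : ((a :: b :: c :: rest').length : Int) > 2 := by simp; omega
        simp only [hlen]
        simp [PySem.List.pyRange, PySem.List.pyGet?, PySem.List.pyIdx?, List.range_succ]
        omega
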